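-- pv_equiv track=rewrite | github.com/wangchulab/MetalNet2 | app/metalloproteome/analysis/extra/scripts/get_metal_ligands.py | has_metal_element
-- ===== SOURCE A (Python) =====
-- metal_elements = {
--     'Li', 'Be', 'Na', 'Mg', 'Al',
--     'K', 'Ca', 'Sc', 'Ti', 'V',
--     'Cr', 'Mn', 'Fe', 'Co', 'Ni',
--     'Cu', 'Zn', 'Ga', 'Rb', 'Sr',
--     'Y', 'Zr', 'Nb', 'Mo', 'Tc',
--     'Ru', 'Rh', 'Pd', 'Ag', 'Cd',
--     'In', 'Sn', 'Cs', 'Ba', 'La',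
--     'Ce', 'Pr', 'Nd', 'Pm', 'Sm',
--     'Eu', 'Gd', 'Tb', 'Dy', 'Ho',
--     'Er', 'Tm', 'Yb', 'Lu', 'Hf',
--     'Ta', 'W', 'Re', 'Os', 'Ir',
--     'Pt', 'Au', 'Hg', 'Tl', 'Pb',
--     'Bi', 'Fr', 'Ra', 'Ac', 'Th',
--     'Pa', 'U', 'Np', 'Pu', 'Am',
--     'Cm', 'Bk', 'Cf', 'Es', 'Fm',
--     'Md', 'No', 'Lr'
-- }
--
-- def has_metal_element(inchi: str):
--     has_metal = False
--     try: chem_formula = inchi[6:].split("/")[1] # InChI=...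
--     except: return False
--     for i in metal_elements:
--         if i in chem_formula:
--             has_metal = True
--             break
--     return has_metal
-- ===== SOURCE B (Python) =====
-- # Inverted direction: instead of substring-searching the formula once per metal
-- # symbol, scan the formula's characters / adjacent pairs and look the metal
-- # catalogue up against them (one-letter symbols by character membership,
-- # two-letter symbols against the set of adjacent character pairs).
-- ONE_LETTER = "KVYWU"
-- TWO_LETTER = ("LiBeNaMgAlCaScTiCrMnFeCoNiCuZnGaRbSrZrNbMoTcRuRhPdAgCdInSnCsBaLa"
--               "CePrNdPmSmEuGdTbDyHoErTmYbLuHfTaReOsIrPtAuHgTlPbBiFrRaAcThPaNpPu"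
--               "AmCmBkCfEsFmMdNoLr")
--
-- def has_metal_element(inchi: str):
--     parts = inchi[6:].split("/")
--     if len(parts) < 2:
--         return False
--     formula = parts[1]
--     if any(c in ONE_LETTER for c in formula):
--         return True
--     pairs = set(zip(formula, formula[1:]))
--     for i in range(0, len(TWO_LETTER), 2):
--         if (TWO_LETTER[i], TWO_LETTER[i + 1]) in pairs:
--             return True
--     return False
-- ===== Notes on version B (the rewrite author's own statement) =====
-- stated objective: alternative
-- what changed: B keeps the same formula extraction but inverts the search direction: instead of A's loop over the 78 metal symbols doing one substring search over the formula per symbol, B scans the formula once for one-letter metal characters and builds the set of its adjacent character pairs, then looks each two-letter catalogue entry (stored as one concatenated string, read in steps of two) up in that set.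
import Mathlib
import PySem

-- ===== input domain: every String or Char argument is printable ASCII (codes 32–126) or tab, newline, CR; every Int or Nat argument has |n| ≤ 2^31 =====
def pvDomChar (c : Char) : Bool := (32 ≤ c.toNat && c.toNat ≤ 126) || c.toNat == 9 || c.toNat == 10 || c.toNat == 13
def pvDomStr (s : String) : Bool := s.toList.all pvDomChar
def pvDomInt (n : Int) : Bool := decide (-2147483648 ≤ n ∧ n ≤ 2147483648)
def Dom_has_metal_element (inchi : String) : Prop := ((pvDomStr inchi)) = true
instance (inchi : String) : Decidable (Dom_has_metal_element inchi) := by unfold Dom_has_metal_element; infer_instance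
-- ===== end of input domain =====

-- B inverts the search direction: instead of A's loop over the 78 metal symbols with one
-- substring search over the formula per symbol, B scans the formula's characters for
-- one-letter metals and its set of adjacent character pairs for two-letter metals.

-- ===== PORT A =====
-- the metal_elements set, as char lists, in the source's literal order (the loop's
-- result is order-independent, so the Python set's iteration order does not matter)
def metalsA : List (List Char) := [
  ['L','i'], ['B','e'], ['N','a'], ['M','g'], ['A','l'],
  ['K'], ['C','a'], ['S','c'], ['T','i'], ['V'],
  ['C','r'], ['M','n'], ['F','e'], ['C','o'], ['N','i'],
  ['C','u'], ['Z','n'], ['G','a'], ['R','b'], ['S','r'],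
  ['Y'], ['Z','r'], ['N','b'], ['M','o'], ['T','c'],
  ['R','u'], ['R','h'], ['P','d'], ['A','g'], ['C','d'],
  ['I','n'], ['S','n'], ['C','s'], ['B','a'], ['L','a'],
  ['C','e'], ['P','r'], ['N','d'], ['P','m'], ['S','m'],
  ['E','u'], ['G','d'], ['T','b'], ['D','y'], ['H','o'],
  ['E','r'], ['T','m'], ['Y','b'], ['L','u'], ['H','f'],
  ['T','a'], ['W'], ['R','e'], ['O','s'], ['I','r'],
  ['P','t'], ['A','u'], ['H','g'], ['T','l'], ['P','b'],
  ['B','i'], ['F','r'], ['R','a'], ['A','c'], ['T','h'],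
  ['P','a'], ['U'], ['N','p'], ['P','u'], ['A','m'],
  ['C','m'], ['B','k'], ['C','f'], ['E','s'], ['F','m'],
  ['M','d'], ['N','o'], ['L','r']]

-- 'for i in metal_elements: if i in chem_formula: has_metal = True; break'
def loopA : List (List Char) → List Char → Bool
  | [], _ => false
  | m :: rest, f => if PySem.Chars.isIn m f then true else loopA rest f

def has_metal_element (inchi : String) : Bool :=
  match PySem.Str.split? (PySem.Str.slice inchi (some 6) none) "/" with
  | none => false        -- unreachable: the separator "/" is nonempty
  | some parts =>
    match PySem.List.pyGet? parts 1 with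
    | none => false      -- 'except: return False'
    | some chem_formula => loopA metalsA chem_formula.toList

-- ===== PORT B =====
def oneLetter : String := "KVYWU"
-- the 73 two-letter metal symbols, concatenated
def twoLetter : String := "LiBeNaMgAlCaScTiCrMnFeCoNiCuZnGaRbSrZrNbMoTcRuRhPdAgCdInSnCsBaLaCePrNdPmSmEuGdTbDyHoErTmYbLuHfTaReOsIrPtAuHgTlPbBiFrRaAcThPaNpPuAmCmBkCfEsFmMdNoLr"

-- 'for i in range(0, len(TWO_LETTER), 2): if (TWO_LETTER[i], TWO_LETTER[i+1]) in pairs: return True'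
def loopB : List Char → PySem.Set (Char × Char) → Bool
  | a :: b :: rest, pairs => if PySem.Set.contains pairs (a, b) then true else loopB rest pairs
  | _, _ => false

def has_metal_element_alt (inchi : String) : Bool :=
  match PySem.Str.split? (PySem.Str.slice inchi (some 6) none) "/" with
  | none => false
  | some parts =>
    if parts.length < 2 then false
    else
      let formula := (parts.getD 1 "").toList
      if formula.any (fun c => oneLetter.toList.contains c) then true
      else loopB twoLetter.toList (PySem.Set.ofList (formula.zip formula.tail))

-- ===== PRECONDITION & SPEC =====
def Spec_has_metal_element (inchi : String) (out : Bool) : Prop := out = has_metal_element_alt inchi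
instance (inchi : String) (out : Bool) : Decidable (Spec_has_metal_element inchi out) := by unfold Spec_has_metal_element; infer_instance

-- ===== CLAIM =====
def Claim_equal_has_metal_element : Prop := ∀ (inchi : String), Dom_has_metal_element inchi → Spec_has_metal_element inchi (has_metal_element inchi)

-- ===== LEMMAS AND PROOFS =====

-- the pairs enumerated by loopB's step-2 recursion
def chunk2 : List Char → List (Char × Char)
  | a :: b :: rest => (a, b) :: chunk2 rest
  | _ => []

lemma loopB_iff (cs : List Char) (ps : PySem.Set (Char × Char)) :
    loopB cs ps = true ↔ ∃ p ∈ chunk2 cs, p ∈ ps := by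
  fun_induction loopB cs ps <;>
    simp_all [chunk2]

lemma loopA_iff (ms : List (List Char)) (f : List Char) :
    loopA ms f = true ↔ ∃ m ∈ ms, m <:+: f := by
  induction ms with
  | nil => simp [loopA]
  | cons m rest ih =>
    show (if PySem.Chars.isIn m f then true else loopA rest f) = true ↔ _
    by_cases h : PySem.Chars.isIn m f = true
    · simp only [h, if_true, true_iff]
      exact ⟨m, List.mem_cons_self, (PySem.Chars.isIn_iff_infix m f).mp h⟩
    · have hm : ¬ m <:+: f := fun hinf => h ((PySem.Chars.isIn_iff_infix m f).mpr hinf)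
      simp only [h, if_false, Bool.false_eq_true, ih]
      constructor
      · rintro ⟨x, hx, hi⟩; exact ⟨x, List.mem_cons_of_mem _ hx, hi⟩
      · rintro ⟨x, hx, hi⟩
        rcases List.mem_cons.mp hx with rfl | hx
        · exact absurd hi hm
        · exact ⟨x, hx, hi⟩

lemma singleton_infix (c : Char) (f : List Char) : [c] <:+: f ↔ c ∈ f := by
  constructor
  · intro h; exact h.mem (by simp)
  · intro h
    obtain ⟨s, t, rfl⟩ := List.append_of_mem h
    exact ⟨s, t, by simp⟩

lemma pair_infix (a b : Char) (f : List Char) : [a, b] <:+: f ↔ (a, b) ∈ f.zip f.tail := by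
  induction f with
  | nil => simp
  | cons c t ih =>
    rw [List.infix_cons_iff]
    cases t with
    | nil => simp [List.prefix_cons_iff]
    | cons d t' =>
      have hz : (c :: d :: t').zip (c :: d :: t').tail = (c, d) :: (d :: t').zip (d :: t').tail := rfl
      rw [hz]
      constructor
      · rintro (hp | hi)
        · rw [List.cons_prefix_cons] at hp
          obtain ⟨rfl, hp2⟩ := hp
          rw [List.cons_prefix_cons] at hp2
          simp [hp2.1]
        · exact List.mem_cons_of_mem _ (ih.mp hi)
      · intro h
        rcases List.mem_cons.mp h with h | h
        · left; rw [Prod.mk.injEq] at h; simp [h.1, h.2, List.cons_prefix_cons]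
        · right; exact ih.mpr h

set_option maxRecDepth 4096 in
lemma metalsA_sub : ∀ m ∈ metalsA, m ∈ oneLetter.toList.map ([·]) ++ (chunk2 twoLetter.toList).map (fun p => [p.1, p.2]) := by decide

set_option maxRecDepth 4096 in
lemma metalsA_sup : ∀ m ∈ oneLetter.toList.map ([·]) ++ (chunk2 twoLetter.toList).map (fun p => [p.1, p.2]), m ∈ metalsA := by decide

lemma exists_metal_iff (f : List Char) :
    (∃ m ∈ metalsA, m <:+: f) ↔
      (∃ c ∈ oneLetter.toList, c ∈ f) ∨ ∃ p ∈ chunk2 twoLetter.toList, p ∈ f.zip f.tail := by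
  have hmem : ∀ m, m ∈ metalsA ↔
      m ∈ oneLetter.toList.map ([·]) ++ (chunk2 twoLetter.toList).map (fun p => [p.1, p.2]) :=
    fun m => ⟨metalsA_sub m, metalsA_sup m⟩
  constructor
  · rintro ⟨m, hm, hinf⟩
    rcases List.mem_append.mp ((hmem m).mp hm) with h | h
    · obtain ⟨c, hc, rfl⟩ := List.mem_map.mp h
      exact Or.inl ⟨c, hc, (singleton_infix c f).mp hinf⟩
    · obtain ⟨⟨x, y⟩, hp, rfl⟩ := List.mem_map.mp h
      exact Or.inr ⟨(x, y), hp, (pair_infix x y f).mp hinf⟩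
  · rintro (⟨c, hc, hm⟩ | ⟨⟨x, y⟩, hp, hm⟩)
    · exact ⟨[c], (hmem [c]).mpr (List.mem_append.mpr (Or.inl (List.mem_map.mpr ⟨c, hc, rfl⟩))),
        (singleton_infix c f).mpr hm⟩
    · exact ⟨[x, y], (hmem [x, y]).mpr (List.mem_append.mpr (Or.inr (List.mem_map.mpr ⟨(x, y), hp, rfl⟩))),
        (pair_infix x y f).mpr hm⟩

set_option maxRecDepth 8192 in
lemma formula_eq (f : List Char) :
    loopA metalsA f =
      (if f.any (fun c => oneLetter.toList.contains c) then true
       else loopB twoLetter.toList (PySem.Set.ofList (f.zip f.tail))) := by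
  rw [Bool.eq_iff_iff, loopA_iff, exists_metal_iff]
  split_ifs with h
  · simp only [iff_true]
    obtain ⟨c, hc, hcont⟩ := List.any_eq_true.mp h
    exact Or.inl ⟨c, by simpa using hcont, by simpa using hc⟩
  · rw [loopB_iff]
    have hone : ¬ ∃ c ∈ oneLetter.toList, c ∈ f := by
      rintro ⟨c, hc, hcf⟩
      exact h (List.any_eq_true.mpr ⟨c, hcf, by simpa using hc⟩)
    simp only [PySem.Set.mem_ofList]
    exact or_iff_right hone

-- ===== VERDICT =====
theorem has_metal_element_spec : Claim_equal_has_metal_element := by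
  intro inchi _
  unfold Spec_has_metal_element has_metal_element has_metal_element_alt
  cases hsp : PySem.Str.split? (PySem.Str.slice inchi (some 6) none) "/" with
  | none => rfl
  | some parts =>
    match parts with
    | [] => simp [PySem.List.pyGet?, PySem.List.pyIdx?]
    | [a] => simp [PySem.List.pyGet?, PySem.List.pyIdx?]
    | a :: b :: rest =>
      simp only [PySem.List.pyGet?, PySem.List.pyIdx?]
      simp [formula_eq]
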